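-- pv_equiv track=rewrite | github.com/priyaram2005/DCL2025 | Day14.py | at_most_k_distinct
-- ===== SOURCE A (Python) =====
-- from collections import defaultdict
--
-- def at_most_k_distinct(s, k):
--     count = defaultdict(int)
--     left = 0
--     res = 0
--
--     for right in range(len(s)):
--         count[s[right]] += 1
--
--         while len(count) > k:
--             count[s[left]] -= 1
--             if count[s[left]] == 0:
--                 del count[s[left]]
--             left += 1
--
--         res += (right - left + 1)
--
--     return res
-- ===== SOURCE B (Python) =====
-- def at_most_k_distinct(s, k):
--     res = 0
--     for i in range(len(s)):
--         seen = set()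
--         for j in range(i, len(s)):
--             seen.add(s[j])
--             if len(seen) > k:
--                 break
--             res += 1
--     return res
-- ===== Notes on version B (the rewrite author's own statement) =====
-- stated objective: alternative
-- what changed: Replaces the amortized sliding window with counts dict by a direct nested enumeration: for each start index a fresh set of seen characters is grown rightwards until it exceeds k distinct, counting each valid end position.
import Mathlib
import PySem

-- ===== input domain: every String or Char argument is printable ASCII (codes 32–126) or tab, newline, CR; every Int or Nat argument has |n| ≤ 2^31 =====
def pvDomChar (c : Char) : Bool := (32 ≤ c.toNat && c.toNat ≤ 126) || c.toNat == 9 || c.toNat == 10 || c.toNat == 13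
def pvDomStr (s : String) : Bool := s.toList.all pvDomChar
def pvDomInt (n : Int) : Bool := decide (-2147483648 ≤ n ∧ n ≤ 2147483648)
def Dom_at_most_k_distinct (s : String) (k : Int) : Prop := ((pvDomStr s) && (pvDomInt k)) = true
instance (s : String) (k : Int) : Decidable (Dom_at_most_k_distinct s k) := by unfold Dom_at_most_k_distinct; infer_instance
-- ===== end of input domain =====

-- B replaces A's sliding window over a counts dict by a direct nested enumeration with a
-- fresh seen-set per start index (alternative algorithm, not faster); for k < 0 on a
-- non-empty string A raises IndexError (excluded by Pre_) while B returns 0.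


-- ===== PORT A =====
-- the 'while len(count) > k' loop; fuel = cs.length + 1 always suffices (left grows past the
-- string first); the 'none' branch is where Python raises IndexError (outside Pre_)
def pvAShrink (cs : List Char) (k : Int) : Nat → PySem.Dict Char Int → Nat → PySem.Dict Char Int × Nat
  | 0, count, left => (count, left)
  | fuel + 1, count, left =>
    if k < (count.size : Int) then
      match PySem.List.pyGet? cs (left : Int) with
      | none => (count, left)
      | some c =>
        let count1 := count.modify c 0 (· - 1)      -- count[s[left]] -= 1 (defaultdict)
        if count1.getD c 0 == 0 then
          pvAShrink cs k fuel (count1.erase c) (left + 1)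
        else
          pvAShrink cs k fuel count1 (left + 1)
    else (count, left)

-- 'for right in range(len(s))': walk the list with the index carried alongside
def pvALoop (cs : List Char) (k : Int) : List Char → Nat → PySem.Dict Char Int → Nat → Int → Int
  | [], _, _, _, res => res
  | c :: rest, right, count, left, res =>
    let count1 := count.modify c 0 (· + 1)          -- count[s[right]] += 1 (defaultdict)
    let p := pvAShrink cs k (cs.length + 1) count1 left
    pvALoop cs k rest (right + 1) p.1 p.2 (res + ((right : Int) - (p.2 : Int) + 1))

def at_most_k_distinct (s : String) (k : Int) : Int :=
  pvALoop s.toList k s.toList 0 PySem.Dict.empty 0 0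

-- ===== PORT B =====
-- inner 'for j in range(i, len(s))' over the suffix, with the seen set and running res
def pvBInner (k : Int) : List Char → PySem.Set Char → Int → Int
  | [], _, res => res
  | c :: rest, seen, res =>
    let seen1 := PySem.Set.add seen c
    if k < (seen1.length : Int) then res            -- break
    else pvBInner k rest seen1 (res + 1)

-- outer 'for i in range(len(s))': one fresh set per suffix
def pvBOuter (k : Int) : List Char → Int → Int
  | [], res => res
  | c :: rest, res => pvBOuter k rest (pvBInner k (c :: rest) PySem.Set.empty res)

def at_most_k_distinct_alt (s : String) (k : Int) : Int := pvBOuter k s.toList 0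

-- ===== PRECONDITION & SPEC =====
-- Pre_ excludes k < 0 with non-empty s: there A's shrink loop indexes past the end of the
-- string and raises IndexError (it returns no value).
def Pre_at_most_k_distinct (s : String) (k : Int) : Prop := 0 ≤ k ∨ s.toList = []
instance (s : String) (k : Int) : Decidable (Pre_at_most_k_distinct s k) := by unfold Pre_at_most_k_distinct; infer_instance
def pvWitness_at_most_k_distinct : String × Int := ("abcba", 2)

def Spec_at_most_k_distinct (s : String) (k : Int) (out : Int) : Prop := out = at_most_k_distinct_alt s k
instance (s : String) (k : Int) (out : Int) : Decidable (Spec_at_most_k_distinct s k out) := by unfold Spec_at_most_k_distinct; infer_instance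

-- ===== CLAIM (what is proved, stated in full; the proofs are below) =====
def Claim_equal_at_most_k_distinct : Prop := ∀ (s : String) (k : Int), Dom_at_most_k_distinct s k → Pre_at_most_k_distinct s k → Spec_at_most_k_distinct s k (at_most_k_distinct s k)

-- ===== LEMMAS AND PROOFS =====

-- the window cs[l:r] and its number of distinct characters
def pvW (cs : List Char) (l r : Nat) : List Char := (cs.take r).drop l
def pvDC (u : List Char) : Nat := u.toFinset.card
-- number of valid start positions for end index r (inclusive)
def pvEnd (cs : List Char) (k : Int) (r : Nat) : Nat :=
  ((Finset.range (r + 1)).filter (fun l => (pvDC (pvW cs l (r + 1)) : Int) ≤ k)).card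
-- number of valid end offsets for start index i
def pvStart (cs : List Char) (k : Int) (i : Nat) : Nat :=
  ((Finset.range (cs.length - i)).filter (fun j => (pvDC ((cs.drop i).take (j + 1)) : Int) ≤ k)).card

theorem pvDC_subset {u v : List Char} (h : u ⊆ v) : pvDC u ≤ pvDC v := by
  apply Finset.card_le_card
  intro x hx
  simp only [List.mem_toFinset] at *
  exact h hx

theorem pvDC_mono_left (cs : List Char) {l l' : Nat} (r : Nat) (h : l ≤ l') :
    pvDC (pvW cs l' r) ≤ pvDC (pvW cs l r) := by
  apply pvDC_subset
  have h2 : pvW cs l' r = (pvW cs l r).drop (l' - l) := by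
    unfold pvW
    rw [List.drop_drop]
    congr 1
    omega
  rw [h2]
  exact List.drop_subset _ _

theorem pvDC_mono_right (cs : List Char) (l : Nat) {r r' : Nat} (h : r ≤ r') :
    pvDC (pvW cs l r) ≤ pvDC (pvW cs l r') := by
  apply pvDC_subset
  exact (List.IsPrefix.drop (List.take_prefix_take_left h) l).subset

theorem pvW_self (cs : List Char) {l r : Nat} (h : r ≤ l) : pvW cs l r = [] := by
  apply List.drop_eq_nil_of_le
  exact le_trans (List.length_take_le _ _) h

theorem pvW_cons (cs : List Char) {l r : Nat} (h1 : l < r) (h2 : r ≤ cs.length) :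
    pvW cs l r = cs[l]'(by omega) :: pvW cs (l + 1) r := by
  unfold pvW
  rw [List.drop_eq_getElem_cons (by simp; omega)]
  congr 1
  exact List.getElem_take

theorem pvW_snoc (cs : List Char) {l r : Nat} (h1 : l ≤ r) (h2 : r < cs.length) :
    pvW cs l (r + 1) = pvW cs l r ++ [cs[r]] := by
  unfold pvW
  rw [List.take_succ, List.drop_append_of_le_length (by simp; omega)]
  congr 1
  simp [List.getElem?_eq_getElem h2]

-- size of a nodup-keyed dict whose keys are the members of u
theorem pvSize_eq {d : PySem.Dict Char Int} {u : List Char} (hnd : d.keys.Nodup)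
    (hmem : ∀ c, c ∈ d.keys ↔ c ∈ u) : d.size = pvDC u := by
  have h1 : d.size = d.keys.length := by simp [PySem.Dict.size, PySem.Dict.keys]
  rw [h1, ← List.toFinset_card_of_nodup hnd]
  unfold pvDC
  congr 1
  ext x
  simp [hmem]

-- erase on a dict: keys and lookups (no such lemmas exist in the prelude)
theorem pvKeys_erase (d : PySem.Dict Char Int) (c : Char) :
    (d.erase c).keys = d.keys.filter (fun x => !(x == c)) := by
  show (d.items.filter _).map _ = (d.items.map _).filter _
  induction d.items with
  | nil => rfl
  | cons p rest ih =>
    by_cases h : p.1 = c <;> simp [List.filter_cons, h, ih]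

theorem pvFind_filter_self (c : Char) : ∀ (l : List (Char × Int)),
    List.find? (fun p => p.1 == c) (l.filter (fun p => !(p.1 == c))) = none
  | [] => rfl
  | p :: rest => by
    by_cases hp : p.1 = c <;>
      simp [List.filter_cons, hp, List.find?_cons, pvFind_filter_self c rest]

theorem pvFind_filter_ne {c x : Char} (h : c ≠ x) : ∀ (l : List (Char × Int)),
    List.find? (fun p => p.1 == c) (l.filter (fun p => !(p.1 == x)))
      = List.find? (fun p => p.1 == c) l
  | [] => rfl
  | p :: rest => by
    by_cases hp : p.1 = x
    · have hxc : (x == c) = false := by simp; exact fun hc => h hc.symm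
      simp [List.filter_cons, hp, List.find?_cons, hxc, pvFind_filter_ne h rest]
    · by_cases hc : p.1 = c <;>
        simp [List.filter_cons, hp, List.find?_cons, hc, h, pvFind_filter_ne h rest]

theorem pvGetD_erase_self (d : PySem.Dict Char Int) (c : Char) (v : Int) :
    (d.erase c).getD c v = v := by
  simp only [PySem.Dict.getD, PySem.Dict.get?, PySem.Dict.erase]
  rw [pvFind_filter_self]
  rfl

theorem pvGetD_erase_ne (d : PySem.Dict Char Int) {c x : Char} (h : c ≠ x) (v : Int) :
    (d.erase x).getD c v = d.getD c v := by
  simp only [PySem.Dict.getD, PySem.Dict.get?, PySem.Dict.erase]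
  rw [pvFind_filter_ne h]

-- the shrink loop: from a faithful window state it stops at the leftmost admissible left
theorem pvAShrink_spec (cs : List Char) (k : Int) (hk : 0 ≤ k) :
    ∀ (fuel : Nat) (count : PySem.Dict Char Int) (left r : Nat), left ≤ r → r ≤ cs.length →
    r - left < fuel →
    count.keys.Nodup → (∀ c, c ∈ count.keys ↔ c ∈ pvW cs left r) →
    (∀ c, count.getD c 0 = ((pvW cs left r).count c : Int)) →
    ∃ count' left',
      pvAShrink cs k fuel count left = (count', left') ∧
      left ≤ left' ∧ left' ≤ r ∧
      count'.keys.Nodup ∧ (∀ c, c ∈ count'.keys ↔ c ∈ pvW cs left' r) ∧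
      (∀ c, count'.getD c 0 = ((pvW cs left' r).count c : Int)) ∧
      ((pvDC (pvW cs left' r) : Int) ≤ k) ∧
      (∀ l, left ≤ l → l < left' → k < (pvDC (pvW cs l r) : Int)) := by
  intro fuel
  induction fuel with
  | zero => intro count left r _ _ hfuel _ _ _; omega
  | succ fuel ih =>
    intro count left r hlr hrn hfuel hnd hmem hcnt
    have hsize : count.size = pvDC (pvW cs left r) := pvSize_eq hnd hmem
    by_cases hgt : k < (count.size : Int)
    · have hlt : left < r := by
        by_contra hco
        have hnil : pvW cs left r = [] := pvW_self cs (by omega)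
        rw [hsize, hnil] at hgt
        simp [pvDC] at hgt
        omega
      have hlcs : left < cs.length := by omega
      have hget : PySem.List.pyGet? cs (left : Int) = some (cs[left]'hlcs) := by
        rw [PySem.List.pyGet?_natCast]
        exact List.getElem?_eq_getElem hlcs
      have hwin : pvW cs left r = cs[left]'hlcs :: pvW cs (left + 1) r := pvW_cons cs hlt hrn
      rw [pvAShrink, if_pos hgt, hget]
      simp only
      have hcnt1 : ∀ x, (count.modify (cs[left]'hlcs) 0 (· - 1)).getD x 0
          = ((pvW cs (left + 1) r).count x : Int) := by
        intro x
        rw [PySem.Dict.getD_modify]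
        by_cases hx : x = cs[left]'hlcs
        · rw [if_pos hx, hcnt, hx, hwin, List.count_cons_self]
          push_cast
          ring
        · rw [if_neg hx, hcnt, hwin]
          simp [List.count_cons, hx, Ne.symm hx]
      have hkeys1 : (count.modify (cs[left]'hlcs) 0 (· - 1)).keys = count.keys := by
        rw [PySem.Dict.keys_modify]
        exact PySem.Dict.keys_insert_of_contains _ _
          ((PySem.Dict.contains_iff_mem_keys _ _).2
            ((hmem _).2 (by rw [hwin]; exact List.mem_cons_self)))
      have hnd1 : (count.modify (cs[left]'hlcs) 0 (· - 1)).keys.Nodup := hkeys1 ▸ hnd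
      by_cases hz : (count.modify (cs[left]'hlcs) 0 (· - 1)).getD (cs[left]'hlcs) 0 = 0
      · -- the erase branch: the departing char no longer occurs in the window
        have hz' : ((pvW cs (left + 1) r).count (cs[left]'hlcs) : Int) = 0 := by
          rw [← hcnt1]
          exact hz
        have hcnot : (cs[left]'hlcs) ∉ pvW cs (left + 1) r := by
          intro hmm
          have := List.count_pos_iff.2 hmm
          omega
        have hnd2 : ((count.modify (cs[left]'hlcs) 0 (· - 1)).erase (cs[left]'hlcs)).keys.Nodup := by
          rw [pvKeys_erase]
          exact hnd1.filter _
        have hmem2 : ∀ x, x ∈ ((count.modify (cs[left]'hlcs) 0 (· - 1)).erase (cs[left]'hlcs)).keys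
            ↔ x ∈ pvW cs (left + 1) r := by
          intro x
          rw [pvKeys_erase, List.mem_filter]
          constructor
          · rintro ⟨hx1, hx2⟩
            have hx3 : x ∈ pvW cs left r := (hmem x).1 (hkeys1 ▸ hx1)
            rw [hwin] at hx3
            rcases List.mem_cons.1 hx3 with h | h
            · simp [h] at hx2
            · exact h
          · intro hx
            refine ⟨hkeys1 ▸ (hmem x).2 ?_, ?_⟩
            · rw [hwin]
              exact List.mem_cons_of_mem _ hx
            · simp only [Bool.not_eq_eq_eq_not, Bool.not_true, beq_eq_false_iff_ne, ne_eq]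
              intro he
              exact hcnot (he ▸ hx)
        have hcnt2 : ∀ x, ((count.modify (cs[left]'hlcs) 0 (· - 1)).erase (cs[left]'hlcs)).getD x 0
            = ((pvW cs (left + 1) r).count x : Int) := by
          intro x
          by_cases hx : x = cs[left]'hlcs
          · rw [hx, pvGetD_erase_self]
            omega
          · rw [pvGetD_erase_ne _ hx]
            exact hcnt1 x
        obtain ⟨count', left', heq, hr1, hr2, hr3, hr4, hr5, hr6, hr7⟩ :=
          ih _ (left + 1) r (by omega) hrn (by omega) hnd2 hmem2 hcnt2
        refine ⟨count', left', ?_, by omega, hr2, hr3, hr4, hr5, hr6, ?_⟩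
        · rw [if_pos (by simpa using hz)]
          exact heq
        · intro l hl1 hl2
          rcases Nat.eq_or_lt_of_le hl1 with rfl | hll
          · rw [← hsize]
            exact hgt
          · exact hr7 l (by omega) hl2
      · -- no erase: the departing char still occurs in the window
        have hcin : (cs[left]'hlcs) ∈ pvW cs (left + 1) r := by
          rw [← List.count_pos_iff]
          have := hcnt1 (cs[left]'hlcs)
          omega
        have hmem1 : ∀ x, x ∈ (count.modify (cs[left]'hlcs) 0 (· - 1)).keys
            ↔ x ∈ pvW cs (left + 1) r := by
          intro x
          rw [hkeys1, hmem, hwin, List.mem_cons]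
          constructor
          · rintro (rfl | h)
            · exact hcin
            · exact h
          · exact Or.inr
        obtain ⟨count', left', heq, hr1, hr2, hr3, hr4, hr5, hr6, hr7⟩ :=
          ih _ (left + 1) r (by omega) hrn (by omega) hnd1 hmem1 hcnt1
        refine ⟨count', left', ?_, by omega, hr2, hr3, hr4, hr5, hr6, ?_⟩
        · rw [if_neg (by simpa using hz)]
          exact heq
        · intro l hl1 hl2
          rcases Nat.eq_or_lt_of_le hl1 with rfl | hll
          · rw [← hsize]
            exact hgt
          · exact hr7 l (by omega) hl2
    · refine ⟨count, left, ?_, le_refl _, hlr, hnd, hmem, hcnt, ?_, ?_⟩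
      · rw [pvAShrink, if_neg hgt]
      · rw [← hsize]
        omega
      · intro l hl1 hl2
        omega

-- the outer loop adds, per end index, the count of valid start positions
theorem pvALoop_spec (cs : List Char) (k : Int) (hk : 0 ≤ k) :
    ∀ (rest : List Char) (r : Nat) (count : PySem.Dict Char Int) (left : Nat) (res : Int),
    rest = cs.drop r → r ≤ cs.length → left ≤ r →
    count.keys.Nodup → (∀ c, c ∈ count.keys ↔ c ∈ pvW cs left r) →
    (∀ c, count.getD c 0 = ((pvW cs left r).count c : Int)) →
    (∀ l, l < left → k < (pvDC (pvW cs l r) : Int)) →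
    ((pvDC (pvW cs left r) : Int) ≤ k) →
    pvALoop cs k rest r count left res = res + ∑ r' ∈ Finset.Ico r cs.length, (pvEnd cs k r' : Int) := by
  intro rest
  induction rest with
  | nil =>
    intro r count left res hdrop hrn _ _ _ _ _ _
    have hge : cs.length ≤ r := List.drop_eq_nil_iff.1 hdrop.symm
    have : r = cs.length := by omega
    subst this
    simp [pvALoop]
  | cons c rest' ih =>
    intro r count left res hdrop hrn hlr hnd hmem hcnt hmin hle
    have hrlt : r < cs.length := by
      by_contra hco
      rw [List.drop_eq_nil_of_le (by omega)] at hdrop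
      exact List.cons_ne_nil _ _ hdrop
    rw [List.drop_eq_getElem_cons hrlt] at hdrop
    injection hdrop with h1 h2
    subst h1
    have hwsnoc : pvW cs left (r + 1) = pvW cs left r ++ [cs[r]'hrlt] := pvW_snoc cs hlr hrlt
    have hcnt1 : ∀ x, (count.modify (cs[r]'hrlt) 0 (· + 1)).getD x 0
        = ((pvW cs left (r + 1)).count x : Int) := by
      intro x
      rw [PySem.Dict.getD_modify, hwsnoc]
      by_cases hx : x = cs[r]'hrlt
      · rw [if_pos hx, hcnt, hx]
        simp [List.count_append]
      · rw [if_neg hx, hcnt]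
        have hne : ¬ (cs[r]'hrlt = x) := fun h => hx h.symm
        simp [List.count_append, List.count_singleton, hne]
    have hcontb : (cs[r]'hrlt ∈ count.keys → count.contains (cs[r]'hrlt) = true) ∧
        (cs[r]'hrlt ∉ count.keys → count.contains (cs[r]'hrlt) = false) := by
      constructor
      · exact fun h => (PySem.Dict.contains_iff_mem_keys _ _).2 h
      · intro h
        cases hcc : count.contains (cs[r]'hrlt) with
        | false => rfl
        | true => exact absurd ((PySem.Dict.contains_iff_mem_keys _ _).1 hcc) h
    have hkeys1 : (count.modify (cs[r]'hrlt) 0 (· + 1)).keys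
        = if cs[r]'hrlt ∈ count.keys then count.keys else count.keys ++ [cs[r]'hrlt] := by
      rw [PySem.Dict.keys_modify]
      by_cases hcont : cs[r]'hrlt ∈ count.keys
      · rw [if_pos hcont]
        exact PySem.Dict.keys_insert_of_contains _ _ (hcontb.1 hcont)
      · rw [if_neg hcont]
        exact PySem.Dict.keys_insert_of_not_contains _ _ (hcontb.2 hcont)
    have hmem1 : ∀ x, x ∈ (count.modify (cs[r]'hrlt) 0 (· + 1)).keys
        ↔ x ∈ pvW cs left (r + 1) := by
      intro x
      rw [hkeys1, hwsnoc]
      by_cases hcont : cs[r]'hrlt ∈ count.keys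
      · rw [if_pos hcont, List.mem_append, hmem]
        constructor
        · exact Or.inl
        · rintro (h | h)
          · exact h
          · rw [List.mem_singleton] at h
            exact h ▸ (hmem _).1 hcont
      · rw [if_neg hcont, List.mem_append, List.mem_append, hmem]
    have hnd1 : (count.modify (cs[r]'hrlt) 0 (· + 1)).keys.Nodup := by
      rw [hkeys1]
      by_cases hcont : cs[r]'hrlt ∈ count.keys
      · rw [if_pos hcont]
        exact hnd
      · rw [if_neg hcont]
        simp only [List.nodup_append, List.nodup_singleton, true_and, and_true]
        refine ⟨hnd, ?_⟩
        intro a ha b hb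
        simp only [List.mem_singleton] at hb
        exact fun hab => hcont ((hab.trans hb) ▸ ha)
    have hmin1 : ∀ l, l < left → k < (pvDC (pvW cs l (r + 1)) : Int) := by
      intro l hl
      have h1 := hmin l hl
      have h2 : pvDC (pvW cs l r) ≤ pvDC (pvW cs l (r + 1)) := pvDC_mono_right cs l (by omega)
      omega
    obtain ⟨count2, left2, heq, hs1, hs2, hs3, hs4, hs5, hs6, hs7⟩ :=
      pvAShrink_spec cs k hk (cs.length + 1) _ left (r + 1) (by omega) (by omega) (by omega)
        hnd1 hmem1 hcnt1
    have hminfull : ∀ l, l < left2 → k < (pvDC (pvW cs l (r + 1)) : Int) := by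
      intro l hl
      by_cases hll : l < left
      · exact hmin1 l hll
      · exact hs7 l (by omega) hl
    simp only [pvALoop, heq]
    rw [ih (r + 1) count2 left2 _ h2 (by omega) hs2 hs3 hs4 hs5 hminfull hs6]
    have hfilter : (Finset.range (r + 1)).filter (fun l => (pvDC (pvW cs l (r + 1)) : Int) ≤ k)
        = Finset.Ico left2 (r + 1) := by
      ext l
      simp only [Finset.mem_filter, Finset.mem_range, Finset.mem_Ico]
      constructor
      · rintro ⟨hl, hok⟩
        refine ⟨?_, hl⟩
        by_contra hco
        have := hminfull l (by omega)
        omega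
      · rintro ⟨hl1, hl2⟩
        refine ⟨hl2, ?_⟩
        have := pvDC_mono_left cs (r + 1) hl1
        omega
    have hend : (pvEnd cs k r : Int) = (r : Int) - (left2 : Int) + 1 := by
      unfold pvEnd
      rw [hfilter, Nat.card_Ico]
      have : left2 ≤ r + 1 := hs2
      push_cast [this]
      omega
    rw [Finset.sum_eq_sum_Ico_succ_bot hrlt, hend]
    ring

theorem pvSetLen (u : List Char) : (PySem.Set.ofList u).length = u.toFinset.card := by
  rw [← List.toFinset_card_of_nodup (PySem.Set.nodup_ofList u)]
  congr 1
  ext x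
  simp [PySem.Set.mem_ofList]

theorem pvCardFilterBot (n : Nat) (P : Nat → Prop) [DecidablePred P] (h0 : P 0) :
    ((Finset.range (n + 1)).filter P).card
      = 1 + ((Finset.range n).filter (fun j => P (j + 1))).card := by
  rw [Finset.card_filter, Finset.card_filter, Finset.sum_range_succ']
  simp [h0, add_comm]

-- B's inner loop counts the admissible prefix extensions
theorem pvBInner_spec (k : Int) :
    ∀ (t p : List Char) (res : Int),
    pvBInner k t (PySem.Set.ofList p) res
      = res + (((Finset.range t.length).filter
          (fun j => ((p ++ t.take (j + 1)).toFinset.card : Int) ≤ k)).card : Int) := by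
  intro t
  induction t with
  | nil => intro p res; simp [pvBInner]
  | cons c rest ih =>
    intro p res
    have hadd : PySem.Set.add (PySem.Set.ofList p) c = PySem.Set.ofList (p ++ [c]) :=
      (PySem.Set.ofList_append_singleton p c).symm
    simp only [pvBInner, hadd, pvSetLen]
    by_cases hbig : k < (((p ++ [c]).toFinset.card : Nat) : Int)
    · rw [if_pos hbig]
      have hemp : ((Finset.range (c :: rest).length).filter
          (fun j => (((p ++ (c :: rest).take (j + 1)).toFinset.card : Nat) : Int) ≤ k)) = ∅ := by
        rw [Finset.filter_eq_empty_iff]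
        intro j _
        have he : p ++ (c :: rest).take (j + 1) = (p ++ [c]) ++ rest.take j := by
          rw [List.take_succ_cons]
          simp
        rw [he]
        have hsub : (p ++ [c]).toFinset.card ≤ ((p ++ [c]) ++ rest.take j).toFinset.card :=
          pvDC_subset (List.subset_append_left _ _)
        intro hle
        omega
      rw [hemp]
      simp
    · rw [if_neg hbig]
      rw [ih (p ++ [c]) (res + 1)]
      have h0 : (((p ++ (c :: rest).take (0 + 1)).toFinset.card : Nat) : Int) ≤ k := by
        rw [List.take_succ_cons, List.take_zero]
        exact le_of_not_gt hbig
      rw [List.length_cons, pvCardFilterBot rest.length _ h0]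
      have hpr : ∀ j : Nat, p ++ (c :: rest).take (j + 1 + 1) = (p ++ [c]) ++ rest.take (j + 1) := by
        intro j
        rw [List.take_succ_cons]
        simp
      simp only [hpr]
      push_cast
      ring

theorem pvBOuter_spec (k : Int) :
    ∀ (u : List Char) (res : Int),
    pvBOuter k u res = res + ∑ i ∈ Finset.range u.length, (pvStart u k i : Int) := by
  intro u
  induction u with
  | nil => intro res; simp [pvBOuter]
  | cons c rest ih =>
    intro res
    simp only [pvBOuter]
    rw [ih, show (PySem.Set.empty : PySem.Set Char) = PySem.Set.ofList [] from rfl,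
      pvBInner_spec k (c :: rest) [] res]
    rw [List.length_cons, Finset.sum_range_succ']
    have h1 : ∀ i, pvStart (c :: rest) k (i + 1) = pvStart rest k i := by
      intro i
      unfold pvStart
      simp [List.drop_succ_cons]
    have h0 : pvStart (c :: rest) k 0
        = ((Finset.range (c :: rest).length).filter
            (fun j => ((([] : List Char) ++ (c :: rest).take (j + 1)).toFinset.card : Int) ≤ k)).card := by
      unfold pvStart pvDC
      simp
    simp only [h1, h0, List.length_cons, Nat.add_comm rest.length 1]
    ring

-- double counting: sum over end indices = sum over start indices
theorem pvSum_swap (cs : List Char) (k : Int) :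
    ∑ r ∈ Finset.range cs.length, (pvEnd cs k r : Int)
      = ∑ i ∈ Finset.range cs.length, (pvStart cs k i : Int) := by
  have hW : ∀ l j : Nat, pvW cs l (l + j + 1) = (cs.drop l).take (j + 1) := by
    intro l j
    unfold pvW
    rw [List.drop_take]
    congr 1
    omega
  have hEnd : ∀ r : Nat, (pvEnd cs k r : Int)
      = ∑ l ∈ Finset.range (r + 1),
          (if (pvDC (pvW cs l (r + 1)) : Int) ≤ k then (1 : Int) else 0) := by
    intro r
    unfold pvEnd
    rw [Finset.card_filter]
    push_cast
    rfl
  have hStart : ∀ i : Nat, (pvStart cs k i : Int)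
      = ∑ j ∈ Finset.range (cs.length - i),
          (if (pvDC ((cs.drop i).take (j + 1)) : Int) ≤ k then (1 : Int) else 0) := by
    intro i
    unfold pvStart
    rw [Finset.card_filter]
    push_cast
    rfl
  simp only [hEnd, hStart]
  rw [Finset.sum_comm' (s := Finset.range cs.length) (t := fun r => Finset.range (r + 1))
    (t' := Finset.range cs.length) (s' := fun l => Finset.Ico l cs.length)
    (by intro r l; simp only [Finset.mem_range, Finset.mem_Ico]; omega)]
  apply Finset.sum_congr rfl
  intro l _
  rw [Finset.sum_Ico_eq_sum_range]
  apply Finset.sum_congr rfl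
  intro j _
  rw [hW]

-- ===== VERDICT (by name: the statement is the Claim_ definition above) =====
theorem at_most_k_distinct_spec : Claim_equal_at_most_k_distinct := by
  intro s k _ hpre
  show at_most_k_distinct s k = at_most_k_distinct_alt s k
  rcases hpre with hk | hnil
  · unfold at_most_k_distinct at_most_k_distinct_alt
    have hnil0 : pvW s.toList 0 0 = [] := pvW_self s.toList (le_refl 0)
    rw [pvALoop_spec s.toList k hk s.toList 0 PySem.Dict.empty 0 0 (List.drop_zero).symm
      (Nat.zero_le _) (le_refl 0)
      (by simp [PySem.Dict.keys_empty])
      (by intro c; simp [PySem.Dict.keys_empty, hnil0])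
      (by intro c; simp [PySem.Dict.getD_empty, hnil0])
      (by intro l hl; omega)
      (by simp [hnil0, pvDC]; omega)]
    rw [pvBOuter_spec k s.toList 0]
    rw [zero_add, zero_add, ← Finset.range_eq_Ico]
    exact pvSum_swap s.toList k
  · simp [at_most_k_distinct, at_most_k_distinct_alt, hnil, pvALoop, pvBOuter]
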